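-- pv_equiv track=rewrite | github.com/NVIDIA/modulus | modulus/models/layers/fft.py | _create_axes_perm
-- ===== SOURCE A (Python) =====
-- from typing import List, Optional, Tuple
--
-- def _create_axes_perm(ndim: int, dims: Tuple[int]) -> Tuple[List[int], List[int]]:
--     """Creates permuted axes indices for RFFT/IRFFT operators."""
--     perm_in = list(range(ndim))
--     perm_out = list(perm_in)
--     # Move indices to the right to make 'dims' as innermost dimensions.
--     for i in range(-1, -(len(dims) + 1), -1):
--         perm_in[dims[i]], perm_in[i] = perm_in[i], perm_in[dims[i]]
--     # Move indices to the left to restore original shape.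
--     for i in range(-len(dims), 0):
--         perm_out[dims[i]], perm_out[i] = perm_out[i], perm_out[dims[i]]
--
--     return perm_in, perm_out
-- ===== SOURCE B (Python) =====
-- from typing import List, Tuple
--
-- def _create_axes_perm(ndim: int, dims: Tuple[int]) -> Tuple[List[int], List[int]]:
--     """Creates permuted axes indices for RFFT/IRFFT operators."""
--     perm_in = list(range(ndim))
--     # Walk dims back-to-front with explicit positive target positions.
--     for t, d in enumerate(reversed(dims)):
--         j = ndim - 1 - t
--         perm_in[d], perm_in[j] = perm_in[j], perm_in[d]
--     # perm_out is the inverse permutation of perm_in.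
--     perm_out = [0] * ndim
--     for j, p in enumerate(perm_in):
--         perm_out[p] = j
--     return perm_in, perm_out
-- ===== Notes on version B (the rewrite author's own statement) =====
-- stated objective: simpler
-- what changed: B replaces A's two negative-index swap loops by one forward loop over enumerate(reversed(dims)) with explicit positive target positions to build perm_in, and builds perm_out directly as the inverse permutation of perm_in (perm_out[p] = j) instead of replaying the swaps in reverse order.
import Mathlib
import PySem

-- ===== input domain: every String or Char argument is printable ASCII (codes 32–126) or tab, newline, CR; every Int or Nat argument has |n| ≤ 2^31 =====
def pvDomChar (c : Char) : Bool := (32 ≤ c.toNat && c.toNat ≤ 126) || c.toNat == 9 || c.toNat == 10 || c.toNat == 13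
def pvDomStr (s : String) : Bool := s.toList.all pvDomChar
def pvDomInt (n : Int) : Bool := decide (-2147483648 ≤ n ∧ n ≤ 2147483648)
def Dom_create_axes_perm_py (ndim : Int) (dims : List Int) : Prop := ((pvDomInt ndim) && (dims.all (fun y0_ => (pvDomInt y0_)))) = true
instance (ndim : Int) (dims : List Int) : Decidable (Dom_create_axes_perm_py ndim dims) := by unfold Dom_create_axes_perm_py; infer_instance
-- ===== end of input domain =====

-- B builds perm_in by one forward loop over enumerate(reversed(dims)) with explicit positive
-- target positions, and builds perm_out directly as the inverse permutation of perm_in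
-- (simpler decomposition, same cost).

-- ===== PORT A =====
-- Python 'perm[d], perm[i] = perm[i], perm[d]': RHS evaluated first, then assigned left to right
def pvSwapPy (L : List Int) (d i : Int) : List Int :=
  let t0 := PySem.List.pyGetD L i 0
  let t1 := PySem.List.pyGetD L d 0
  PySem.List.pySetD (PySem.List.pySetD L d t0) i t1

def create_axes_perm_py (ndim : Int) (dims : List Int) : List Int × List Int :=
  let perm_in0 := PySem.List.pyRange 0 ndim 1
  let perm_out0 := perm_in0
  let perm_in := (PySem.List.pyRange (-1) (-((dims.length : Int) + 1)) (-1)).foldl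
      (fun L i => pvSwapPy L (PySem.List.pyGetD dims i 0) i) perm_in0
  let perm_out := (PySem.List.pyRange (-(dims.length : Int)) 0 1).foldl
      (fun L i => pvSwapPy L (PySem.List.pyGetD dims i 0) i) perm_out0
  (perm_in, perm_out)

-- ===== PORT B =====
def create_axes_perm_py_alt (ndim : Int) (dims : List Int) : List Int × List Int :=
  -- for t, d in enumerate(reversed(dims)): j = ndim-1-t; perm_in[d], perm_in[j] = perm_in[j], perm_in[d]
  let perm_in := (PySem.List.enumerate dims.reverse 0).foldl
      (fun L td =>
        let j := ndim - 1 - td.1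
        let a := PySem.List.pyGetD L j 0
        let b := PySem.List.pyGetD L td.2 0
        PySem.List.pySetD (PySem.List.pySetD L td.2 a) j b)
      (PySem.List.pyRange 0 ndim 1)
  -- perm_out = [0] * ndim; for j, p in enumerate(perm_in): perm_out[p] = j
  let perm_out := (PySem.List.enumerate perm_in 0).foldl
      (fun out jp => PySem.List.pySetD out jp.2 jp.1) (PySem.List.pyRepeat [(0 : Int)] ndim)
  (perm_in, perm_out)

-- ===== PRECONDITION & SPEC =====
-- Pre_ excludes exactly the inputs on which A raises IndexError: a dims entry out of range for a
-- list of length max(ndim,0), or more dims entries than dimensions.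
def Pre_create_axes_perm_py (ndim : Int) (dims : List Int) : Prop :=
  (dims.length : Int) ≤ max ndim 0 ∧ ∀ d ∈ dims, -(max ndim 0) ≤ d ∧ d < max ndim 0
instance (ndim : Int) (dims : List Int) : Decidable (Pre_create_axes_perm_py ndim dims) := by
  unfold Pre_create_axes_perm_py; infer_instance

def pvWitness_create_axes_perm_py : Int × List Int := (4, [1, -1])

def Spec_create_axes_perm_py (ndim : Int) (dims : List Int) (out : List Int × List Int) : Prop := out = create_axes_perm_py_alt ndim dims
instance (ndim : Int) (dims : List Int) (out : List Int × List Int) : Decidable (Spec_create_axes_perm_py ndim dims out) := by unfold Spec_create_axes_perm_py; infer_instance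

-- ===== CLAIM (what is proved, stated in full; the proofs are below) =====
def Claim_equal_create_axes_perm_py : Prop := ∀ (ndim : Int) (dims : List Int), Dom_create_axes_perm_py ndim dims → Pre_create_axes_perm_py ndim dims → Spec_create_axes_perm_py ndim dims (create_axes_perm_py ndim dims)

-- ===== LEMMAS AND PROOFS =====

def pvListOf (g : Nat → Nat) (n : Nat) : List Int := (List.range n).map (fun j => (g j : Int))
def pvTau (a b : Nat) (x : Nat) : Nat := if x = a then b else if x = b then a else x
def pvSwapL (L : List Int) (a b : Nat) : List Int :=
  (L.set a (L.getD b 0)).set b (L.getD a 0)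
def pvFnFrom (g : Nat → Nat) (ps : List (Nat × Nat)) : Nat → Nat :=
  ps.foldl (fun f p => f ∘ pvTau p.1 p.2) g
def pvPos (n : Nat) (x : Int) : Nat := if x < 0 then ((n : Int) + x).toNat else x.toNat

lemma pvGetD_eq (xs : List Int) (x : Int) (h1 : -(xs.length:Int) ≤ x) (h2 : x < (xs.length:Int)) :
    PySem.List.pyGetD xs x 0 = xs.getD (pvPos xs.length x) 0 := by
  simp only [PySem.List.pyGetD, PySem.List.pyGet?, PySem.List.pyIdx?, List.getD_eq_getElem?_getD, pvPos]
  by_cases hx : x < 0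
  · rw [if_neg (by omega), if_pos h1, if_pos hx]
    have : xs.length - (-x).toNat = ((xs.length:Int) + x).toNat := by omega
    rw [this]; simp
  · rw [if_pos (by omega), if_pos h2, if_neg hx]; simp

lemma pvSetD_eq (xs : List Int) (x v : Int) (h1 : -(xs.length:Int) ≤ x) (h2 : x < (xs.length:Int)) :
    PySem.List.pySetD xs x v = xs.set (pvPos xs.length x) v := by
  simp only [PySem.List.pySetD, PySem.List.pySet?, PySem.List.pyIdx?, pvPos]
  by_cases hx : x < 0
  · rw [if_neg (by omega), if_pos h1, if_pos hx]
    have : xs.length - (-x).toNat = ((xs.length:Int) + x).toNat := by omega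
    rw [this]; simp
  · rw [if_pos (by omega), if_pos h2, if_neg hx]; simp

lemma pvLen_listOf (g : Nat → Nat) (n : Nat) : (pvListOf g n).length = n := by
  simp [pvListOf]

lemma pvGetD_listOf (g : Nat → Nat) (n q : Nat) (hq : q < n) :
    (pvListOf g n).getD q 0 = (g q : Int) := by
  simp [pvListOf, List.getD_eq_getElem?_getD, hq]

-- swap on pvListOf is composition with a transposition
lemma pvSwap_listOf (g : Nat → Nat) (n a b : Nat) (ha : a < n) (hb : b < n) :
    pvSwapL (pvListOf g n) a b = pvListOf (g ∘ pvTau a b) n := by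
  apply List.ext_getElem
  · simp [pvSwapL, pvListOf]
  · intro q hq1 hq2
    simp only [pvSwapL] at *
    rw [List.getElem_set, List.getElem_set]
    simp only [pvListOf, List.getElem_map, List.getElem_range]
    rw [show (List.map (fun j => ((g j : Int))) (List.range n)) = pvListOf g n from rfl,
        pvGetD_listOf g n a ha, pvGetD_listOf g n b hb]
    simp only [pvTau, Function.comp_apply]
    split_ifs <;> first | rfl | (subst_vars; rfl) | (exfalso; omega)

lemma pvTau_invol (a b x : Nat) : pvTau a b (pvTau a b x) = x := by
  simp only [pvTau]; split_ifs <;> omega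

lemma pvTau_lt (n a b x : Nat) (ha : a < n) (hb : b < n) (hx : x < n) : pvTau a b x < n := by
  simp only [pvTau]; split_ifs <;> omega

lemma pvFnFrom_eq (ps : List (Nat × Nat)) : ∀ g, pvFnFrom g ps = g ∘ pvFnFrom id ps := by
  induction ps with
  | nil => intro g; rfl
  | cons p ps ih =>
      intro g
      simp only [pvFnFrom, List.foldl_cons] at *
      rw [ih (g ∘ pvTau p.1 p.2), ih (id ∘ pvTau p.1 p.2)]
      rfl

lemma pvFnFrom_append (ps qs : List (Nat × Nat)) :
    pvFnFrom id (ps ++ qs) = pvFnFrom id ps ∘ pvFnFrom id qs := by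
  rw [pvFnFrom, List.foldl_append, ← pvFnFrom, ← pvFnFrom, pvFnFrom_eq]

lemma pvFnFrom_cons (p : Nat × Nat) (ps : List (Nat × Nat)) :
    pvFnFrom id (p :: ps) = pvTau p.1 p.2 ∘ pvFnFrom id ps := by
  show pvFnFrom (id ∘ pvTau p.1 p.2) ps = _
  rw [pvFnFrom_eq]; rfl

lemma pvFn_inv_right (ps : List (Nat × Nat)) (x : Nat) :
    pvFnFrom id ps (pvFnFrom id ps.reverse x) = x := by
  induction ps generalizing x with
  | nil => rfl
  | cons p ps ih =>
      rw [List.reverse_cons, pvFnFrom_cons, pvFnFrom_append, pvFnFrom_cons]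
      simp only [Function.comp_apply, pvFnFrom]
      show pvTau p.1 p.2 (pvFnFrom id ps (pvFnFrom id ps.reverse (pvTau p.1 p.2 x))) = x
      rw [ih, pvTau_invol]

lemma pvFn_inv_left (ps : List (Nat × Nat)) (x : Nat) :
    pvFnFrom id ps.reverse (pvFnFrom id ps x) = x := by
  induction ps generalizing x with
  | nil => rfl
  | cons p ps ih =>
      rw [List.reverse_cons, pvFnFrom_cons, pvFnFrom_append, pvFnFrom_cons]
      simp only [Function.comp_apply]
      show pvFnFrom id ps.reverse (pvFnFrom id [p] (pvTau p.1 p.2 (pvFnFrom id ps x))) = x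
      have : pvFnFrom id [p] (pvTau p.1 p.2 (pvFnFrom id ps x)) = pvFnFrom id ps x := by
        show pvTau p.1 p.2 (pvTau p.1 p.2 (pvFnFrom id ps x)) = _
        rw [pvTau_invol]
      rw [this, ih]

lemma pvFn_lt (n : Nat) (ps : List (Nat × Nat)) (hps : ∀ p ∈ ps, p.1 < n ∧ p.2 < n)
    (x : Nat) (hx : x < n) : pvFnFrom id ps x < n := by
  induction ps generalizing x with
  | nil => exact hx
  | cons p ps ih =>
      rw [pvFnFrom_cons]
      have h := hps p (by simp)
      exact pvTau_lt n p.1 p.2 _ h.1 h.2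
        (ih (fun q hq => hps q (List.mem_cons_of_mem _ hq)) x hx)

lemma pvPos_lt (n : Nat) (x : Int) (h1 : -(n:Int) ≤ x) (h2 : x < (n:Int)) : pvPos n x < n := by
  simp only [pvPos]; split_ifs <;> omega

lemma pvSwapPy_eq {n : Nat} (L : List Int) (d i : Int) (hL : L.length = n)
    (hd1 : -(n:Int) ≤ d) (hd2 : d < (n:Int)) (hi1 : -(n:Int) ≤ i) (hi2 : i < (n:Int)) :
    pvSwapPy L d i = pvSwapL L (pvPos n d) (pvPos n i) := by
  subst hL
  simp only [pvSwapPy, pvSwapL]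
  rw [pvGetD_eq L i hi1 hi2, pvGetD_eq L d hd1 hd2, pvSetD_eq L d _ hd1 hd2]
  rw [pvSetD_eq _ i _ (by simpa using hi1) (by simpa using hi2)]
  simp [List.length_set]

lemma pvGetD_mem (xs : List Int) (x : Int) (_hx : xs ≠ []) (h1 : -(xs.length:Int) ≤ x) (h2 : x < (xs.length:Int)) :
    PySem.List.pyGetD xs x 0 ∈ xs := by
  rw [pvGetD_eq xs x h1 h2, List.getD_eq_getElem?_getD]
  have hlt : pvPos xs.length x < xs.length := pvPos_lt _ _ h1 h2
  rw [List.getElem?_eq_getElem hlt]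
  exact List.getElem_mem _

-- a fold of Python tuple-swaps over a list of (Int × Int) in-range index pairs
lemma pvLoopPairs (n : Nat) (qs : List (Int × Int))
    (hq : ∀ q ∈ qs, (-(n:Int) ≤ q.1 ∧ q.1 < (n:Int)) ∧ (-(n:Int) ≤ q.2 ∧ q.2 < (n:Int))) :
    ∀ g, qs.foldl (fun L q => pvSwapPy L q.1 q.2) (pvListOf g n)
      = pvListOf (pvFnFrom g (qs.map (fun q => (pvPos n q.1, pvPos n q.2)))) n := by
  induction qs with
  | nil => intro g; rfl
  | cons q qs ih =>
      intro g
      have h := hq q (by simp)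
      simp only [List.foldl_cons, List.map_cons]
      rw [pvSwapPy_eq (n := n) _ _ _ (pvLen_listOf g n) h.1.1 h.1.2 h.2.1 h.2.2,
          pvSwap_listOf g n _ _ (pvPos_lt _ _ h.1.1 h.1.2) (pvPos_lt _ _ h.2.1 h.2.2),
          ih (fun r hr => hq r (List.mem_cons_of_mem _ hr))]
      rfl

lemma pvInit (ndim : Int) : PySem.List.pyRange 0 ndim 1 = pvListOf id ndim.toNat := by
  rw [PySem.List.pyRange_one]
  simp [pvListOf]

-- the index-pair list of A's first loop (loop order)
def pvQs1 (dims : List Int) : List (Int × Int) :=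
  (PySem.List.pyRange (-1) (-((dims.length : Int) + 1)) (-1)).map
    (fun i => (PySem.List.pyGetD dims i 0, i))

-- the index-pair list of A's second loop (loop order)
def pvQs2 (dims : List Int) : List (Int × Int) :=
  (PySem.List.pyRange (-(dims.length : Int)) 0 1).map
    (fun i => (PySem.List.pyGetD dims i 0, i))

lemma pvQs_range (dims : List Int) (n : Nat) (hkn : dims.length ≤ n)
    (hd : ∀ d ∈ dims, -(n:Int) ≤ d ∧ d < (n:Int)) (i : Int)
    (hi1 : -(dims.length:Int) ≤ i) (hi2 : i < 0) :
    (-(n:Int) ≤ PySem.List.pyGetD dims i 0 ∧ PySem.List.pyGetD dims i 0 < (n:Int))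
      ∧ (-(n:Int) ≤ i ∧ i < (n:Int)) := by
  have hne : dims ≠ [] := by intro h; subst h; simp at hi1 hi2; omega
  exact ⟨hd _ (pvGetD_mem dims i hne hi1 (by omega)), by omega, by omega⟩

lemma pvQs1_range (dims : List Int) (n : Nat) (hkn : dims.length ≤ n)
    (hd : ∀ d ∈ dims, -(n:Int) ≤ d ∧ d < (n:Int)) :
    ∀ q ∈ pvQs1 dims, (-(n:Int) ≤ q.1 ∧ q.1 < (n:Int)) ∧ (-(n:Int) ≤ q.2 ∧ q.2 < (n:Int)) := by
  intro q hq
  simp only [pvQs1, List.mem_map] at hq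
  obtain ⟨i, hi, rfl⟩ := hq
  rw [PySem.List.mem_pyRange_neg_one] at hi
  exact pvQs_range dims n hkn hd i (by omega) (by omega)

lemma pvQs2_range (dims : List Int) (n : Nat) (hkn : dims.length ≤ n)
    (hd : ∀ d ∈ dims, -(n:Int) ≤ d ∧ d < (n:Int)) :
    ∀ q ∈ pvQs2 dims, (-(n:Int) ≤ q.1 ∧ q.1 < (n:Int)) ∧ (-(n:Int) ≤ q.2 ∧ q.2 < (n:Int)) := by
  intro q hq
  simp only [pvQs2, List.mem_map] at hq
  obtain ⟨i, hi, rfl⟩ := hq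
  rw [PySem.List.mem_pyRange_one] at hi
  exact pvQs_range dims n hkn hd i (by omega) (by omega)

-- A's perm_in in closed form
lemma pvPermInA_eq (ndim : Int) (dims : List Int) (hkn : dims.length ≤ ndim.toNat)
    (hd : ∀ d ∈ dims, -(ndim.toNat:Int) ≤ d ∧ d < (ndim.toNat:Int)) :
    (PySem.List.pyRange (-1) (-((dims.length : Int) + 1)) (-1)).foldl
      (fun L i => pvSwapPy L (PySem.List.pyGetD dims i 0) i) (PySem.List.pyRange 0 ndim 1)
    = pvListOf (pvFnFrom id ((pvQs1 dims).map
        (fun q => (pvPos ndim.toNat q.1, pvPos ndim.toNat q.2)))) ndim.toNat := by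
  rw [pvInit, show (PySem.List.pyRange (-1) (-((dims.length : Int) + 1)) (-1)).foldl
        (fun L i => pvSwapPy L (PySem.List.pyGetD dims i 0) i) (pvListOf id ndim.toNat)
      = (pvQs1 dims).foldl (fun L q => pvSwapPy L q.1 q.2) (pvListOf id ndim.toNat) from by
        rw [pvQs1, List.foldl_map]]
  exact pvLoopPairs ndim.toNat (pvQs1 dims) (pvQs1_range dims ndim.toNat hkn hd) id

-- A's perm_out in closed form
lemma pvPermOutA_eq (ndim : Int) (dims : List Int) (hkn : dims.length ≤ ndim.toNat)
    (hd : ∀ d ∈ dims, -(ndim.toNat:Int) ≤ d ∧ d < (ndim.toNat:Int)) :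
    (PySem.List.pyRange (-(dims.length : Int)) 0 1).foldl
      (fun L i => pvSwapPy L (PySem.List.pyGetD dims i 0) i) (PySem.List.pyRange 0 ndim 1)
    = pvListOf (pvFnFrom id ((pvQs2 dims).map
        (fun q => (pvPos ndim.toNat q.1, pvPos ndim.toNat q.2)))) ndim.toNat := by
  rw [pvInit, show (PySem.List.pyRange (-(dims.length : Int)) 0 1).foldl
        (fun L i => pvSwapPy L (PySem.List.pyGetD dims i 0) i) (pvListOf id ndim.toNat)
      = (pvQs2 dims).foldl (fun L q => pvSwapPy L q.1 q.2) (pvListOf id ndim.toNat) from by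
        rw [pvQs2, List.foldl_map]]
  exact pvLoopPairs ndim.toNat (pvQs2 dims) (pvQs2_range dims ndim.toNat hkn hd) id

-- the index-pair list of B's first loop (loop order)
def pvQsB (ndim : Int) (dims : List Int) : List (Int × Int) :=
  (PySem.List.enumerate dims.reverse 0).map (fun td => (td.2, ndim - 1 - td.1))

-- B's swap step is the Python tuple-swap at (d, ndim-1-t)
lemma pvStepB_eq (ndim : Int) :
    (fun (L : List Int) (td : Int × Int) =>
        let j := ndim - 1 - td.1
        let a := PySem.List.pyGetD L j 0
        let b := PySem.List.pyGetD L td.2 0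
        PySem.List.pySetD (PySem.List.pySetD L td.2 a) j b)
    = fun L td => pvSwapPy L td.2 (ndim - 1 - td.1) := rfl

-- B's loop visits the same index pairs (up to pvPos-normalisation) as A's first loop
lemma pvQsB_eq (ndim : Int) (dims : List Int) (n : Nat) (hmax : max ndim 0 = (n:Int))
    (hkn : dims.length ≤ n) :
    (pvQsB ndim dims).map (fun q => (pvPos n q.1, pvPos n q.2))
      = (pvQs1 dims).map (fun q => (pvPos n q.1, pvPos n q.2)) := by
  have hlen1 : (pvQsB ndim dims).length = dims.length := by
    simp [pvQsB, PySem.List.length_enumerate]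
  have hrw : PySem.List.pyRange (-1) (-((dims.length : Int) + 1)) (-1)
      = (PySem.List.pyRange (-(dims.length : Int)) 0 1).reverse := by
    rw [PySem.List.pyRange_neg_one_eq_reverse]; norm_num
  have hlen2 : (pvQs1 dims).length = dims.length := by
    rw [pvQs1, List.length_map, hrw, List.length_reverse, PySem.List.length_pyRange_one]
    omega
  apply List.ext_getElem
  · simp [hlen1, hlen2]
  · intro t h1 h2
    have htk : t < dims.length := by simpa [hlen1] using h1
    have hn1 : 1 ≤ n := by omega
    have hndim : ndim = (n:Int) := by omega
    set k := dims.length with hk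
    have hlenr : (PySem.List.pyRange (-(k : Int)) 0 1).length = k := by
      simp [PySem.List.length_pyRange_one]
    simp only [pvQsB, pvQs1, List.getElem_map]
    rw [PySem.List.getElem_enumerate, List.getElem_of_eq hrw]
    simp only [List.getElem_reverse]
    rw [PySem.List.getElem_pyRange_one, hlenr]
    have hcast : -(k:Int) + ((k - 1 - t : Nat) : Int) = -1 - (t:Int) := by omega
    rw [hcast]
    have hget : PySem.List.pyGetD dims (-1 - (t:Int)) 0 = dims[k - 1 - t]'(by omega) := by
      rw [pvGetD_eq dims _ (by omega) (by omega)]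
      have : pvPos dims.length (-1 - (t:Int)) = k - 1 - t := by
        simp only [pvPos, ← hk]; split_ifs with h <;> omega
      rw [this, List.getD_eq_getElem?_getD, List.getElem?_eq_getElem (by omega)]
      simp
    rw [hget]
    have hpos1 : pvPos n (ndim - 1 - ((0:Int) + (t:Int))) = n - 1 - t := by
      simp only [pvPos, hndim]; split_ifs with h <;> omega
    have hpos2 : pvPos n (-1 - (t:Int)) = n - 1 - t := by
      simp only [pvPos]; split_ifs with h <;> omega
    simp only [hpos1, hpos2]
    rfl

lemma pvEnum_map (m : Nat) : ∀ (v : Nat → Nat) (s : Int),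
    PySem.List.enumerate ((List.range m).map (fun j => (v j : Int))) s
      = (List.range m).map (fun (j : Nat) => (((s + j : Int)), (v j : Int))) := by
  induction m with
  | zero => intro v s; simp [PySem.List.enumerate_nil]
  | succ m ih =>
      intro v s
      rw [List.range_succ_eq_map]
      simp only [List.map_cons, List.map_map, PySem.List.enumerate_cons]
      rw [show ((fun j => ((v j : Nat) : Int)) ∘ Nat.succ) = fun j => ((v (j + 1) : Nat) : Int) from by
            funext j; simp [Nat.succ_eq_add_one]]
      rw [ih (fun j => v (j + 1)) (s + 1)]
      congr 1
      · simp
      · apply List.map_congr_left; intro j hj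
        simp [Function.comp, Nat.succ_eq_add_one]
        ring

lemma pvWriteFold_len (g : Nat → Nat) (js : List Nat) (out : List Int) :
    (js.foldl (fun o j => o.set (g j) ((j : Nat) : Int)) out).length = out.length := by
  induction js generalizing out with
  | nil => rfl
  | cons j js ih => simp only [List.foldl_cons]; rw [ih]; simp

lemma pvWriteFold_skip (g : Nat → Nat) (js : List Nat) (out : List Int) (q : Nat)
    (hq : ∀ j ∈ js, g j ≠ q) :
    (js.foldl (fun o j => o.set (g j) ((j : Nat) : Int)) out)[q]? = out[q]? := by
  induction js generalizing out with
  | nil => rfl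
  | cons j js ih =>
      simp only [List.foldl_cons]
      rw [ih _ (fun j' hj' => hq j' (List.mem_cons_of_mem _ hj'))]
      exact List.getElem?_set_ne (hq j (by simp))

lemma pvRange_split (j0 n : Nat) (h : j0 < n) :
    List.range n = List.range j0 ++ j0 :: (List.range (n - j0 - 1)).map (fun t => j0 + 1 + t) := by
  have h1 : n = j0 + (n - j0 - 1 + 1) := by omega
  conv_lhs => rw [h1, List.range_add, List.range_succ_eq_map]
  simp only [List.map_cons, List.map_map, Nat.add_zero]
  congr 1
  congr 1
  apply List.map_congr_left; intro t ht
  simp [Function.comp]; omega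

lemma pvWriteFold_main (g h : Nat → Nat) (n q : Nat) (hq : q < n)
    (hgh : g (h q) = q) (hhq : h q < n) (hinj : ∀ j, j < n → h (g j) = j)
    (out : List Int) (hlen : out.length = n) :
    ((List.range n).foldl (fun o j => o.set (g j) ((j : Nat) : Int)) out)[q]? = some ((h q : Nat) : Int) := by
  rw [pvRange_split (h q) n hhq, List.foldl_append, List.foldl_cons]
  rw [pvWriteFold_skip]
  · rw [hgh, List.getElem?_set_self',
        List.getElem?_eq_getElem (by rw [pvWriteFold_len]; omega)]
    simp
  · intro j hj
    simp only [List.mem_map] at hj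
    obtain ⟨t, ht, rfl⟩ := hj
    intro hcontra
    have := hinj (h q + 1 + t) (by simp at ht; omega)
    rw [hcontra] at this
    omega

-- B's second loop builds the inverse of pvListOf (pvFnFrom id ps.reverse), which is
-- pvListOf (pvFnFrom id ps): the reversed swap sequence computes the inverse permutation.
lemma pvPermOutB_eq (n : Nat) (ps : List (Nat × Nat)) (hps : ∀ p ∈ ps, p.1 < n ∧ p.2 < n)
    (init : List Int) (hinit : init = List.replicate n 0) :
    (PySem.List.enumerate (pvListOf (pvFnFrom id ps.reverse) n) 0).foldl
      (fun out jp => PySem.List.pySetD out jp.2 jp.1) init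
    = pvListOf (pvFnFrom id ps) n := by
  subst hinit
  set g := pvFnFrom id ps.reverse with hg
  set h := pvFnFrom id ps with hh
  have hrev : ∀ p ∈ ps.reverse, p.1 < n ∧ p.2 < n := by
    intro p hp; exact hps p (List.mem_reverse.mp hp)
  rw [show pvListOf g n = (List.range n).map (fun j => (g j : Int)) from rfl, pvEnum_map]
  rw [List.foldl_map]
  rw [show (fun (out : List Int) (j : Nat) =>
        PySem.List.pySetD out ((g j : Nat) : Int) ((0 : Int) + (j : Nat)))
      = fun (out : List Int) (j : Nat) => out.set (g j) ((j : Nat) : Int) from by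
        funext out j; simp [pysem]]
  apply List.ext_getElem?
  intro q
  by_cases hq : q < n
  · rw [pvWriteFold_main g h n q hq
        (pvFn_inv_left ps q)
        (pvFn_lt n ps hps q hq)
        (fun j _ => pvFn_inv_right ps j)
        _ (by simp)]
    simp [pvListOf, List.getElem?_map, List.getElem?_range hq]
  · rw [List.getElem?_eq_none, List.getElem?_eq_none]
    · simp [pvListOf]; omega
    · rw [pvWriteFold_len]; simp; omega

-- the normalised pairs of A's loops are reverses of each other
lemma pvQs12_rev (dims : List Int) (n : Nat) :
    (pvQs1 dims).map (fun q => (pvPos n q.1, pvPos n q.2))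
      = ((pvQs2 dims).map (fun q => (pvPos n q.1, pvPos n q.2))).reverse := by
  rw [← List.map_reverse]
  congr 1
  simp only [pvQs1, pvQs2, ← List.map_reverse]
  congr 1
  rw [PySem.List.pyRange_neg_one_eq_reverse]
  norm_num

lemma pvQs2_lt (dims : List Int) (n : Nat) (hkn : dims.length ≤ n)
    (hd : ∀ d ∈ dims, -(n:Int) ≤ d ∧ d < (n:Int)) :
    ∀ p ∈ (pvQs2 dims).map (fun q => (pvPos n q.1, pvPos n q.2)), p.1 < n ∧ p.2 < n := by
  intro p hp
  simp only [List.mem_map] at hp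
  obtain ⟨q, hq, rfl⟩ := hp
  have h := pvQs2_range dims n hkn hd q hq
  exact ⟨pvPos_lt _ _ h.1.1 h.1.2, pvPos_lt _ _ h.2.1 h.2.2⟩

-- A's perm_out loop replays the same transpositions in reverse order, i.e. computes the inverse
-- permutation of perm_in — which is what B builds directly.
theorem pvPorts_eq (ndim : Int) (dims : List Int)
    (hlen : (dims.length : Int) ≤ max ndim 0)
    (hd : ∀ d ∈ dims, -(max ndim 0) ≤ d ∧ d < max ndim 0) :
    create_axes_perm_py ndim dims = create_axes_perm_py_alt ndim dims := by
  have hmax : max ndim 0 = (ndim.toNat : Int) := by omega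
  rw [hmax] at hlen hd
  have hkn : dims.length ≤ ndim.toNat := by exact_mod_cast hlen
  set n := ndim.toNat with hn
  show (_, _) = (_, _)
  have hB1 : (PySem.List.enumerate dims.reverse 0).foldl
      (fun L td =>
        let j := ndim - 1 - td.1
        let a := PySem.List.pyGetD L j 0
        let b := PySem.List.pyGetD L td.2 0
        PySem.List.pySetD (PySem.List.pySetD L td.2 a) j b)
      (PySem.List.pyRange 0 ndim 1)
      = pvListOf (pvFnFrom id ((pvQs1 dims).map (fun q => (pvPos n q.1, pvPos n q.2)))) n := by
    rw [pvStepB_eq, show (PySem.List.enumerate dims.reverse 0).foldl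
          (fun L td => pvSwapPy L td.2 (ndim - 1 - td.1)) (PySem.List.pyRange 0 ndim 1)
        = (pvQsB ndim dims).foldl (fun L q => pvSwapPy L q.1 q.2) (PySem.List.pyRange 0 ndim 1)
        from by rw [pvQsB, List.foldl_map], pvInit]
    rw [pvLoopPairs n (pvQsB ndim dims) ?_ id, pvQsB_eq ndim dims n (by omega) hkn]
    intro q hq
    simp only [pvQsB, List.mem_map, PySem.List.mem_enumerate_iff] at hq
    obtain ⟨td, ⟨t, ht, rfl⟩, rfl⟩ := hq
    have htk : t < dims.length := by simpa using ht
    have hdmem : dims.reverse[t]'ht ∈ dims := by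
      have : dims.reverse[t]'ht ∈ dims.reverse := List.getElem_mem _
      exact List.mem_reverse.mp this
    have hdr := hd _ hdmem
    refine ⟨⟨by exact_mod_cast hdr.1, by exact_mod_cast hdr.2⟩, ?_, ?_⟩ <;> simp <;> omega
  have hA1 := pvPermInA_eq ndim dims hkn (by intro d hdm; exact_mod_cast hd d hdm)
  have hA2 := pvPermOutA_eq ndim dims hkn (by intro d hdm; exact_mod_cast hd d hdm)
  simp only [hA1, hA2, hB1]
  rw [Prod.mk.injEq]
  refine ⟨rfl, ?_⟩
  rw [pvQs12_rev dims n,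
      pvPermOutB_eq n ((pvQs2 dims).map (fun q => (pvPos n q.1, pvPos n q.2)))
        (pvQs2_lt dims n hkn (by intro d hdm; exact_mod_cast hd d hdm))
        _ ?_]
  rw [PySem.List.pyRepeat_singleton]

-- ===== VERDICT (by name: the statement is the Claim_ definition above) =====
theorem create_axes_perm_py_spec : Claim_equal_create_axes_perm_py := by
  intro ndim dims _hDom hPre
  exact pvPorts_eq ndim dims hPre.1 hPre.2
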